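-- pv_equiv track=rewrite | github.com/Lourenco18/42-Commmon-Core | EXAMS/exam_rank03/exercices/TEST.py | sculptor
-- ===== SOURCE A (Python) =====
-- def sculptor(s)-> str:
--     p = ""
--     i = 0
--     v = False
--     while i < len(s):
--         if s[i].isalpha():
--             if v:
--                 p += s[i].upper()
--             else:
--                 v = not v
--                 p += s[i].lower()
--         else:
--             p += s[i]
--         i+=1
--     return p
-- ===== SOURCE B (Python) =====
-- def sculptor(s) -> str:
--     i = next((j for j, c in enumerate(s) if c.isalpha()), None)
--     if i is None:
--         return s
--     return s[:i] + s[i].lower() + s[i+1:].upper()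
-- ===== Notes on version B (the rewrite author's own statement) =====
-- stated objective: faster
-- what changed: Replaces the flag-driven per-character while loop with quadratic string += by a locate-first-alpha-then-slice decomposition: keep the prefix verbatim, lowercase the first letter, uppercase the rest with one slice .upper().
import Mathlib
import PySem

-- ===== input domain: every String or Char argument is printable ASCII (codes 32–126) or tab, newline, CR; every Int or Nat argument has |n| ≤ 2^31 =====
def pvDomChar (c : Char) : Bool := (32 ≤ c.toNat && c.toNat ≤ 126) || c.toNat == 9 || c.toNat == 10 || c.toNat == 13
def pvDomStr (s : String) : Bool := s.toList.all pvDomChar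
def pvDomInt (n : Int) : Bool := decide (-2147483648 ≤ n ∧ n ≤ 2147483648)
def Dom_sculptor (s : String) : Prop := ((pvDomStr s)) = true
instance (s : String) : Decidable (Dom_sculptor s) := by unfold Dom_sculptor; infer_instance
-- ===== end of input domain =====

-- B replaces A's flag-driven character loop with a locate-first-alpha-then-slice decomposition (simpler; return value only).


-- ===== PORT A =====
-- one iteration of A's while loop: state is (p, v), the character is s[i]
def sculptorStep : (List Char × Bool) → Char → (List Char × Bool)
| (p, v), c =>
  if PySem.Chars.isalpha c then
    if v then (p ++ [PySem.Chars.upperChar c], v)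
    else (p ++ [PySem.Chars.lowerChar c], true)
  else (p ++ [c], v)

def sculptor (s : String) : String :=
  String.ofList (s.toList.foldl sculptorStep ([], false)).1

-- ===== PORT B =====
def sculptor_alt (s : String) : String :=
  match s.toList.findIdx? PySem.Chars.isalpha with
  | none => s
  | some i =>
      String.ofList (s.toList.take i ++ [PySem.Chars.lowerChar (s.toList.getD i ' ')]
                  ++ PySem.Chars.upper (s.toList.drop (i + 1)))

-- ===== PRECONDITION & SPEC =====
def Spec_sculptor (s : String) (out : String) : Prop := out = sculptor_alt s
instance (s : String) (out : String) : Decidable (Spec_sculptor s out) := by unfold Spec_sculptor; infer_instance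

-- ===== CLAIM (what is proved, stated in full; the proofs are below) =====
def Claim_equal_sculptor : Prop := ∀ (s : String), Dom_sculptor s → Spec_sculptor s (sculptor s)

-- ===== LEMMAS AND PROOFS =====
theorem upperChar_of_not_alpha (c : Char) (h : PySem.Chars.isalpha c = false) :
    PySem.Chars.upperChar c = c := by
  simp [PySem.Chars.isalpha] at h
  simp [PySem.Chars.upperChar, h.2]

theorem sculptorGo_true (cs : List Char) : ∀ p : List Char,
    cs.foldl sculptorStep (p, true) = (p ++ cs.map PySem.Chars.upperChar, true) := by
  induction cs with
  | nil => simp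
  | cons c rest ih =>
    intro p
    by_cases h : PySem.Chars.isalpha c = true
    · simp [sculptorStep, h, ih]
    · simp only [Bool.not_eq_true] at h
      simp [sculptorStep, h, ih, upperChar_of_not_alpha c h]

theorem sculptorGo_false (cs : List Char) : ∀ p : List Char,
    (cs.foldl sculptorStep (p, false)).1 =
      p ++ (match cs.findIdx? PySem.Chars.isalpha with
            | none => cs
            | some i => cs.take i ++ [PySem.Chars.lowerChar (cs.getD i ' ')]
                         ++ (cs.drop (i + 1)).map PySem.Chars.upperChar) := by
  induction cs with
  | nil => simp
  | cons c rest ih =>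
    intro p
    by_cases h : PySem.Chars.isalpha c = true
    · simp [sculptorStep, h, List.findIdx?_cons, sculptorGo_true]
    · simp only [Bool.not_eq_true] at h
      simp only [List.foldl_cons, sculptorStep, h, if_false, Bool.false_eq_true, ih]
      simp [List.findIdx?_cons, h]
      cases hf : rest.findIdx? PySem.Chars.isalpha with
      | none => simp
      | some i => simp

-- ===== VERDICT (by name: the statement is the Claim_ definition above) =====
theorem sculptor_spec : Claim_equal_sculptor := by
  intro s _
  unfold Spec_sculptor sculptor sculptor_alt
  rw [sculptorGo_false]
  cases hf : s.toList.findIdx? PySem.Chars.isalpha with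
  | none => simp [String.ofList_toList]
  | some i => simp [PySem.Chars.upper]
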